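-- pv_equiv track=rewrite | github.com/ymimouni/ctci_python | chapter_01_arrays_and_strings/question_01_04_palindrome_permutation.py | check_at_most_one_bit_set
-- ===== SOURCE A (Python) =====
-- def check_at_most_one_bit_set(bit_vector):
--     bits_set = 0
--
--     for char in bin(bit_vector):
--         if char == "1":
--             bits_set += 1
--             if bits_set > 1:
--                 return False
--
--     return True
-- ===== SOURCE B (Python) =====
-- def check_at_most_one_bit_set(bit_vector):
--     v = abs(bit_vector)
--     return v & (v - 1) == 0
-- ===== Notes on version B (the rewrite author's own statement) =====
-- stated objective: simpler
-- what changed: Replaces the scan over the sign-magnitude binary string bin(bit_vector) counting one-bits by the closed-form power-of-two-or-zero test: one bitwise-and of the magnitude with its predecessor, compared against zero; no string, no loop, no counter.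
import Mathlib
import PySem

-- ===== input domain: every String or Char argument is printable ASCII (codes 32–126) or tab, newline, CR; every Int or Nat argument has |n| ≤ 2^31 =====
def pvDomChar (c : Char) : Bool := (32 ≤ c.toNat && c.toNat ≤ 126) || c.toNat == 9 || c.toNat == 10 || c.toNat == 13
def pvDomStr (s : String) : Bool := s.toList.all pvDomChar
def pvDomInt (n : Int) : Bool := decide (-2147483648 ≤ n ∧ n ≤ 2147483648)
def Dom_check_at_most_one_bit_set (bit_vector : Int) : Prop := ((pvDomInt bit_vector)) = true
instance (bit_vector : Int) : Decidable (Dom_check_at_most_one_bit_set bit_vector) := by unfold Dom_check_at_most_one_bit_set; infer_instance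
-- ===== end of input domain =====

-- B replaces A's scan over the sign-magnitude string bin(bit_vector) by the closed-form
-- power-of-two-or-zero test abs(v) & (abs(v) - 1) == 0 (simpler: no string, no loop, no counter).

-- ===== PORT A =====
-- A's for-loop over the characters of bin(bit_vector), with the counter and the early 'return False'
def pvLoopA : List Char → Nat → Bool
  | [], _ => true
  | c :: rest, bits_set =>
    if c = '1' then
      if bits_set + 1 > 1 then false else pvLoopA rest (bits_set + 1)
    else pvLoopA rest bits_set

def check_at_most_one_bit_set (bit_vector : Int) : Bool :=
  pvLoopA (PySem.Int.pyBin bit_vector).toList 0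

-- ===== PORT B =====
def check_at_most_one_bit_set_alt (bit_vector : Int) : Bool :=
  let v : Int := |bit_vector|
  decide (PySem.Int.band v (v - 1) = 0)

-- ===== PRECONDITION & SPEC =====
def Spec_check_at_most_one_bit_set (bit_vector : Int) (out : Bool) : Prop := out = check_at_most_one_bit_set_alt bit_vector
instance (bit_vector : Int) (out : Bool) : Decidable (Spec_check_at_most_one_bit_set bit_vector out) := by unfold Spec_check_at_most_one_bit_set; infer_instance

-- ===== CLAIM (what is proved, stated in full; the proofs are below) =====
def Claim_equal_check_at_most_one_bit_set : Prop := ∀ (bit_vector : Int), Dom_check_at_most_one_bit_set bit_vector → Spec_check_at_most_one_bit_set bit_vector (check_at_most_one_bit_set bit_vector)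

-- ===== LEMMAS AND PROOFS =====

-- population count by repeated halving
def pvPc : Nat → Nat
  | 0 => 0
  | n + 1 => pvPc ((n + 1) / 2) + (n + 1) % 2
decreasing_by omega

theorem pvPc_zero : pvPc 0 = 0 := by rw [pvPc]

theorem pvPc_eq (m : Nat) (h : m ≠ 0) : pvPc m = pvPc (m / 2) + m % 2 := by
  cases m with
  | zero => exact absurd rfl h
  | succ n => rw [pvPc]

theorem pvPc_pos (m : Nat) (hm : 0 < m) : 0 < pvPc m := by
  induction m using Nat.strong_induction_on with
  | _ m ih =>
    rw [pvPc_eq m (by omega)]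
    rcases Nat.mod_two_eq_zero_or_one m with h | h
    · have h2 : 0 < m / 2 := by omega
      have := ih (m / 2) (by omega) h2
      omega
    · omega

theorem pv_count_toDigitsCore : ∀ (fuel n : Nat) (ds : List Char), n < fuel →
    (Nat.toDigitsCore 2 fuel n ds).count '1' = pvPc n + ds.count '1' := by
  intro fuel
  induction fuel with
  | zero => intro n ds h; exact absurd h (Nat.not_lt_zero n)
  | succ f ih =>
    intro n ds h
    rw [Nat.toDigitsCore]
    by_cases h0 : n / 2 = 0
    · rw [if_pos h0]
      have : n = 0 ∨ n = 1 := by omega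
      rcases this with rfl | rfl
      · simp [Nat.digitChar, List.count_cons, pvPc]
      · simp [Nat.digitChar, List.count_cons]
        rw [pvPc_eq 1 (by omega)]
        simp [pvPc]
        omega
    · rw [if_neg h0]
      have h2 : n / 2 < f := by omega
      rw [ih (n / 2) _ h2, pvPc_eq n (by omega)]
      rcases Nat.mod_two_eq_zero_or_one n with h1 | h1 <;>
        rw [h1] <;> simp [Nat.digitChar, List.count_cons] <;> omega

theorem pvLoopA_eq : ∀ (cs : List Char) (b : Nat), b ≤ 1 →
    pvLoopA cs b = decide (cs.count '1' + b ≤ 1) := by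
  intro cs
  induction cs with
  | nil => intro b hb; simp [pvLoopA]; omega
  | cons c rest ih =>
    intro b hb
    rw [pvLoopA]
    by_cases hc : c = '1'
    · rw [if_pos hc]; subst hc
      by_cases hb1 : b + 1 > 1
      · rw [if_pos hb1, List.count_cons_self]
        have h2 : ¬ (rest.count '1' + 1 + b ≤ 1) := by omega
        simp [h2]
      · rw [if_neg hb1, ih (b + 1) (by omega), List.count_cons_self]
        exact decide_eq_decide.mpr (by omega)
    · rw [if_neg hc, ih b hb]
      have : (c == '1') = false := by simpa using hc
      simp [List.count_cons, this]

theorem pv_land_pred_iff : ∀ m : Nat, (m &&& (m - 1) = 0) ↔ pvPc m ≤ 1 := by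
  intro m
  induction m using Nat.strong_induction_on with
  | _ m ih =>
    by_cases hm0 : m = 0
    · subst hm0; rw [pvPc_zero]; decide
    by_cases hm1 : m = 1
    · subst hm1
      rw [pvPc_eq 1 (by omega), pvPc_zero]
      decide
    have hq : 0 < m / 2 := by omega
    have e2 : (m &&& (m - 1)) / 2 = m / 2 &&& (m - 1) / 2 := Nat.and_div_two
    have e1 : (m &&& (m - 1)) % 2 = m % 2 &&& (m - 1) % 2 := by
      have := @Nat.and_mod_two_pow m (m - 1) 1
      simpa using this
    have hsplit : (m &&& (m - 1) = 0) ↔ ((m &&& (m - 1)) / 2 = 0 ∧ (m &&& (m - 1)) % 2 = 0) := by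
      omega
    rcases Nat.mod_two_eq_zero_or_one m with hpar | hpar
    · -- m even, m ≥ 2
      have d1 : (m - 1) / 2 = m / 2 - 1 := by omega
      have d2 : (m - 1) % 2 = 1 := by omega
      rw [hsplit, e2, e1, d1, d2, hpar]
      rw [ih (m / 2) (by omega), pvPc_eq m (by omega), hpar]
      simp
    · -- m odd, m ≥ 3
      have d1 : (m - 1) / 2 = m / 2 := by omega
      have d2 : (m - 1) % 2 = 0 := by omega
      rw [hsplit, e2, e1, d1, d2, hpar]
      simp [Nat.and_self]
      have hp := pvPc_pos (m / 2) hq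
      rw [pvPc_eq m (by omega), hpar]
      constructor <;> intro h <;> omega

theorem pv_band_natCast (a b : Nat) : PySem.Int.band (a : Int) (b : Int) = ((a &&& b : Nat) : Int) := by
  simp [PySem.Int.band, Int.toNat_natCast]

theorem pvA_eq (n : Int) : check_at_most_one_bit_set n = decide (pvPc n.natAbs ≤ 1) := by
  rw [check_at_most_one_bit_set, PySem.Int.toList_pyBin, PySem.Int.toBinChars0b]
  have hd : ∀ m : Nat, pvLoopA (Nat.toDigits 2 m) 0 = decide (pvPc m ≤ 1) := by
    intro m
    rw [pvLoopA_eq _ 0 (by omega), Nat.toDigits,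
      pv_count_toDigitsCore (m + 1) m [] (Nat.lt_succ_self m)]
    simp
  by_cases hn : n < 0
  · rw [if_pos hn]
    show pvLoopA ('-' :: '0' :: 'b' :: Nat.toDigits 2 n.natAbs) 0 = _
    rw [pvLoopA, if_neg (by decide), pvLoopA, if_neg (by decide), pvLoopA, if_neg (by decide)]
    exact hd n.natAbs
  · rw [if_neg hn]
    show pvLoopA ('0' :: 'b' :: Nat.toDigits 2 n.toNat) 0 = _
    rw [pvLoopA, if_neg (by decide), pvLoopA, if_neg (by decide)]
    have : n.toNat = n.natAbs := by omega
    rw [this]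
    exact hd n.natAbs

theorem pvB_eq (n : Int) : check_at_most_one_bit_set_alt n = decide (pvPc n.natAbs ≤ 1) := by
  show decide (PySem.Int.band |n| (|n| - 1) = 0) = _
  by_cases hm : n.natAbs = 0
  · have hn : n = 0 := by omega
    subst hn
    rw [show (Int.natAbs 0) = 0 from rfl, pvPc_zero,
      show |(0 : Int)| = 0 from abs_zero, show ((0 : Int) - 1) = -1 from rfl,
      PySem.Int.band_neg_one]
    decide
  · have habs : |n| = (n.natAbs : Int) := Int.abs_eq_natAbs n
    have hsub : ((n.natAbs : Int) - 1) = ((n.natAbs - 1 : Nat) : Int) := by omega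
    rw [habs, hsub, pv_band_natCast]
    refine decide_eq_decide.mpr ?_
    rw [show (((n.natAbs &&& (n.natAbs - 1) : Nat) : Int) = 0) ↔ (n.natAbs &&& (n.natAbs - 1) = 0) from by omega]
    exact pv_land_pred_iff n.natAbs

-- ===== VERDICT (by name: the statement is the Claim_ definition above) =====
theorem check_at_most_one_bit_set_spec : Claim_equal_check_at_most_one_bit_set := by
  intro n _
  unfold Spec_check_at_most_one_bit_set
  rw [pvA_eq, pvB_eq]
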